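-- pv_equiv track=rewrite | github.com/inferno-pytorch/inferno | inferno/utils/math_utils.py | max_allowed_ds_steps
-- ===== SOURCE A (Python) =====
-- def max_allowed_ds_steps(shape, factor):
--     """How often can a shape be down-sampled by a given factor
--         such that non of the divisions will give non-integers.
--
--     Args:
--         shape (listlike): tensor shape
--         factor (integer): downsample factor
--
--     Returns:
--         int: maximum allowed downsample operations
--     """
--     def max_allowed_ds_steps_impl(size, factor):
--
--         current_size = float(size)
--         allowed_steps = 0
--         while(True):
--
--             new_size = current_size / float(factor)
--             if(new_size >=1 and new_size.is_integer()):
--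
--                 current_size = new_size
--                 allowed_steps += 1
--             else:
--                 break
--         return allowed_steps
--
--     min_steps = float('inf')
--
--     for s in shape:
--         min_steps = int(min(min_steps, max_allowed_ds_steps_impl(s, factor)))
--
--     return min_steps
-- ===== SOURCE B (Python) =====
-- def max_allowed_ds_steps(shape, factor):
--     """How often can a shape be down-sampled by a given factor
--     such that none of the divisions gives a non-integer.
--
--     Transposed loop nest: instead of counting per-dimension steps and
--     taking the min, repeatedly divide ALL dimensions simultaneously and
--     count the full rounds; the loop stops at the first round some
--     dimension would leave the integers or drop below 1."""
--     sizes = [float(s) for s in shape]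
--     steps = 0
--     while sizes and all((s / float(factor)) >= 1 and (s / float(factor)).is_integer()
--                         for s in sizes):
--         sizes = [s / float(factor) for s in sizes]
--         steps += 1
--     return steps
-- ===== Notes on version B (the rewrite author's own statement) =====
-- stated objective: faster
-- what changed: Transposed the loop nest: instead of an inner while-loop counting downsample steps per dimension and folding min over dimensions, B performs simultaneous division rounds over the whole shape and counts full rounds; it stops at the first round any dimension fails, so it never computes per-dimension counts beyond the minimum (A always does).
-- outside the precondition, e.g. on max_allowed_ds_steps([], 2): A returns inf, B returns 0
import Mathlib
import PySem

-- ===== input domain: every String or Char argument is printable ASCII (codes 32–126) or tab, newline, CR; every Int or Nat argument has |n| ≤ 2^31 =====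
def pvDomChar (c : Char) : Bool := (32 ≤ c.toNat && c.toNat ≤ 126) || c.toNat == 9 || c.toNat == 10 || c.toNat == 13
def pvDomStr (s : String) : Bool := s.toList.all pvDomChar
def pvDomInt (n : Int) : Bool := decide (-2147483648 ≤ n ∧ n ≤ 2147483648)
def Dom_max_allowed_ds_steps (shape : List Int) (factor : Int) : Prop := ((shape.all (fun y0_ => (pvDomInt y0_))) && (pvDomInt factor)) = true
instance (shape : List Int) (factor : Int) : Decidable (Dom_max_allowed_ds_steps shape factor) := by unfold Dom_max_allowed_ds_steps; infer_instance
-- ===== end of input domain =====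

-- B transposes A's loop nest: simultaneous whole-shape division rounds (outer loop over
-- rounds, all/map over dimensions) instead of per-dimension while-loops folded with min.

-- ===== PORT A =====
-- Inner while(True) loop of A. On Dom all float values are exactly representable and a
-- quotient is an integer iff factor ∣ current_size, so float division + is_integer() is
-- ported exactly as `factor ∣ c ∧ 1 ≤ c / factor` (division exact when it fires).
-- Fuel bounds the loop (≤ 32 iterations possible on Dom inside Pre_; 64 is ample).
def pvImplA (fuel : Nat) (c f : Int) (steps : Int) : Int :=
  match fuel with
  | 0 => steps
  | fuel + 1 =>
    if f ∣ c ∧ 1 ≤ c / f then pvImplA fuel (c / f) f (steps + 1) else steps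

-- min_steps starts at float('inf'); for nonempty shape (Pre_) the first fold step yields the
-- first per-dimension count, so the fold is seeded with it; [] is excluded by Pre_ (A returns
-- the float inf there, not an int).
def max_allowed_ds_steps (shape : List Int) (factor : Int) : Int :=
  match shape with
  | [] => 0
  | s :: rest => rest.foldl (fun m t => min m (pvImplA 64 t factor 0)) (pvImplA 64 s factor 0)

-- ===== PORT B =====
-- One simultaneous division round succeeds iff every size divides evenly and stays ≥ 1
-- (same exact float-to-Int reading as in port A).
def pvRoundOk (sizes : List Int) (f : Int) : Bool :=
  sizes.all (fun s => decide (f ∣ s ∧ 1 ≤ s / f))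

def pvLoopB (fuel : Nat) (sizes : List Int) (f : Int) (steps : Int) : Int :=
  match fuel with
  | 0 => steps
  | fuel + 1 =>
    if sizes ≠ [] ∧ pvRoundOk sizes f = true then
      pvLoopB fuel (sizes.map (fun s => s / f)) f (steps + 1)
    else steps

def max_allowed_ds_steps_alt (shape : List Int) (factor : Int) : Int :=
  pvLoopB 64 shape factor 0

-- ===== PRECONDITION & SPEC =====
-- Pre_ excludes: empty shape (A returns float('inf'), not an int); factor = 0 (A raises
-- ZeroDivisionError); factor = 1 with some dimension ≥ 1 (A's inner while loop diverges).
def Pre_max_allowed_ds_steps (shape : List Int) (factor : Int) : Prop :=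
  shape ≠ [] ∧ factor ≠ 0 ∧ (factor = 1 → ∀ s ∈ shape, s < 1)
instance (shape : List Int) (factor : Int) : Decidable (Pre_max_allowed_ds_steps shape factor) := by
  unfold Pre_max_allowed_ds_steps; infer_instance

def pvWitness_max_allowed_ds_steps : List Int × Int := ([12, 8], 2)

def Spec_max_allowed_ds_steps (shape : List Int) (factor : Int) (out : Int) : Prop := out = max_allowed_ds_steps_alt shape factor
instance (shape : List Int) (factor : Int) (out : Int) : Decidable (Spec_max_allowed_ds_steps shape factor out) := by unfold Spec_max_allowed_ds_steps; infer_instance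

-- ===== CLAIM (what is proved, stated in full; the proofs are below) =====
def Claim_equal_max_allowed_ds_steps : Prop := ∀ (shape : List Int) (factor : Int), Dom_max_allowed_ds_steps shape factor → Pre_max_allowed_ds_steps shape factor → Spec_max_allowed_ds_steps shape factor (max_allowed_ds_steps shape factor)

-- ===== LEMMAS AND PROOFS =====

theorem pvImplA_acc (n : Nat) (c f steps : Int) :
    pvImplA n c f steps = steps + pvImplA n c f 0 := by
  induction n generalizing c steps with
  | zero => simp [pvImplA]
  | succ n ih =>
    simp only [pvImplA]
    split_ifs with h
    · rw [ih (c / f) (steps + 1), ih (c / f) (0 + 1)]; ring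
    · simp

theorem pvLoopB_acc (n : Nat) (sizes : List Int) (f steps : Int) :
    pvLoopB n sizes f steps = steps + pvLoopB n sizes f 0 := by
  induction n generalizing sizes steps with
  | zero => simp [pvLoopB]
  | succ n ih =>
    simp only [pvLoopB]
    split_ifs with h
    · rw [ih _ (steps + 1), ih _ (0 + 1)]; ring
    · simp

theorem pvImplA_nonneg (n : Nat) (c f : Int) : 0 ≤ pvImplA n c f 0 := by
  induction n generalizing c with
  | zero => simp [pvImplA]
  | succ n ih =>
    simp only [pvImplA]
    split_ifs with h
    · rw [pvImplA_acc]; have := ih (c / f); omega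
    · omega

-- fold of min with zero seed over zero values is zero
theorem foldl_min_zero (l : List Int) (g : Int → Int) (hg : ∀ t ∈ l, g t = 0) :
    l.foldl (fun m t => min m (g t)) 0 = 0 := by
  induction l with
  | nil => rfl
  | cons x xs ih =>
    simp only [List.foldl_cons, hg x (by simp)]
    simpa using ih (fun t ht => hg t (by simp [ht]))

theorem foldl_min_le_seed (l : List Int) (g : Int → Int) (a : Int) :
    l.foldl (fun m t => min m (g t)) a ≤ a := by
  induction l generalizing a with
  | nil => simp
  | cons x xs ih =>
    simp only [List.foldl_cons]
    exact le_trans (ih _) (min_le_left _ _)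

theorem foldl_min_le_mem (l : List Int) (g : Int → Int) (a b : Int) (hb : b ∈ l) :
    l.foldl (fun m t => min m (g t)) a ≤ g b := by
  induction l generalizing a with
  | nil => cases hb
  | cons x xs ih =>
    simp only [List.foldl_cons]
    rcases List.mem_cons.mp hb with rfl | hb'
    · exact le_trans (foldl_min_le_seed _ _ _) (min_le_right _ _)
    · exact ih _ hb'

theorem foldl_min_nonneg (l : List Int) (g : Int → Int) (a : Int)
    (ha : 0 ≤ a) (hg : ∀ t ∈ l, 0 ≤ g t) :
    0 ≤ l.foldl (fun m t => min m (g t)) a := by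
  induction l generalizing a with
  | nil => simpa
  | cons x xs ih =>
    simp only [List.foldl_cons]
    exact ih _ (le_min ha (hg x (by simp))) (fun t ht => hg t (by simp [ht]))

theorem foldl_min_add_one (l : List Int) (g : Int → Int) (a : Int) :
    l.foldl (fun m t => min m (1 + g t)) (1 + a) =
      1 + l.foldl (fun m t => min m (g t)) a := by
  induction l generalizing a with
  | nil => simp
  | cons x xs ih =>
    simp only [List.foldl_cons]
    rw [show min (1 + a) (1 + g x) = 1 + min a (g x) by omega]
    exact ih _

theorem foldl_min_congr (l : List Int) (g g' : Int → Int) (a : Int)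
    (h : ∀ t ∈ l, g t = g' t) :
    l.foldl (fun m t => min m (g t)) a = l.foldl (fun m t => min m (g' t)) a := by
  induction l generalizing a with
  | nil => rfl
  | cons x xs ih =>
    simp only [List.foldl_cons, h x (by simp)]
    exact ih _ (fun t ht => h t (List.mem_cons_of_mem x ht))

-- the key transposition lemma: B's simultaneous rounds = min over per-dimension counts,
-- for ANY common fuel
theorem rounds_eq_min (n : Nat) (f : Int) :
    ∀ (s : Int) (rest : List Int),
      pvLoopB n (s :: rest) f 0 =
        rest.foldl (fun m t => min m (pvImplA n t f 0)) (pvImplA n s f 0) := by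
  induction n with
  | zero =>
    intro s rest
    simp only [pvLoopB, pvImplA]
    exact (foldl_min_zero rest _ (fun t _ => rfl)).symm
  | succ n ih =>
    intro s rest
    by_cases hok : pvRoundOk (s :: rest) f = true
    · -- every dimension passes this round
      have hall : ∀ t ∈ s :: rest, f ∣ t ∧ 1 ≤ t / f := by
        intro t ht
        have := (List.all_eq_true.mp hok) t ht
        exact of_decide_eq_true this
      have hs := hall s (by simp)
      -- LHS: one round then recurse on the mapped list
      have lhs : pvLoopB (n + 1) (s :: rest) f 0 =
          1 + pvLoopB n ((s / f) :: rest.map (fun t => t / f)) f 0 := by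
        show (if s :: rest ≠ [] ∧ pvRoundOk (s :: rest) f = true then
              pvLoopB n ((s :: rest).map (fun s => s / f)) f (0 + 1) else 0) = _
        rw [if_pos ⟨List.cons_ne_nil s rest, hok⟩, pvLoopB_acc, List.map_cons]
        norm_num
      rw [lhs, ih (s / f) (rest.map (fun t => t / f))]
      -- RHS: each per-dimension count unfolds one step
      have unfoldA : ∀ t ∈ s :: rest,
          pvImplA (n + 1) t f 0 = 1 + pvImplA n (t / f) f 0 := by
        intro t ht
        show (if f ∣ t ∧ 1 ≤ t / f then pvImplA n (t / f) f (0 + 1) else 0) = _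
        rw [if_pos (hall t ht), pvImplA_acc]
        norm_num
      rw [foldl_min_congr rest (fun t => pvImplA (n+1) t f 0)
            (fun t => 1 + pvImplA n (t / f) f 0) _ (fun t ht => unfoldA t (by simp [ht])),
          unfoldA s (by simp), foldl_min_add_one,
          List.foldl_map]
    · -- some dimension fails: both sides are 0
      obtain ⟨t0, ht0, hfail⟩ : ∃ t0 ∈ s :: rest, ¬ (f ∣ t0 ∧ 1 ≤ t0 / f) := by
        by_contra h
        refine hok (List.all_eq_true.mpr (fun t ht => decide_eq_true ?_))
        by_contra hc
        exact h ⟨t, ht, hc⟩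
      have ht0zero : pvImplA (n + 1) t0 f 0 = 0 := by
        show (if f ∣ t0 ∧ 1 ≤ t0 / f then pvImplA n (t0 / f) f (0 + 1) else 0) = 0
        rw [if_neg hfail]
      have lhs0 : pvLoopB (n + 1) (s :: rest) f 0 = 0 := by
        show (if s :: rest ≠ [] ∧ pvRoundOk (s :: rest) f = true then
              pvLoopB n ((s :: rest).map (fun s => s / f)) f (0 + 1) else 0) = 0
        rw [if_neg]
        intro h2
        exact hok h2.2
      rw [lhs0]
      have hle : rest.foldl (fun m t => min m (pvImplA (n+1) t f 0)) (pvImplA (n+1) s f 0) ≤ 0 := by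
        rcases List.mem_cons.mp ht0 with rfl | hmem
        · exact le_trans (foldl_min_le_seed _ _ _) (le_of_eq ht0zero)
        · exact le_trans (foldl_min_le_mem _ _ _ _ hmem) (le_of_eq ht0zero)
      have hge := foldl_min_nonneg rest (fun t => pvImplA (n+1) t f 0)
        (pvImplA (n+1) s f 0) (pvImplA_nonneg _ _ _) (fun t _ => pvImplA_nonneg _ _ _)
      simp only at hge
      omega

-- ===== VERDICT (by name: the statement is the Claim_ definition above) =====
theorem max_allowed_ds_steps_spec : Claim_equal_max_allowed_ds_steps := by
  intro shape factor _hdom hpre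
  unfold Spec_max_allowed_ds_steps
  obtain ⟨hne, -, -⟩ := hpre
  cases shape with
  | nil => exact absurd rfl hne
  | cons s rest =>
    unfold max_allowed_ds_steps max_allowed_ds_steps_alt
    exact (rounds_eq_min 64 factor s rest).symm
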